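-- pv_equiv track=rewrite | github.com/miyauchikazuyoshi/InsightSpike-AI | experiments/maze-navigation-enhanced/src/experiments/generate_complex_maze_report.py | loop_erased_length
-- ===== SOURCE A (Python) =====
-- def loop_erased_length(path: list[tuple[int,int]]) -> int:
--     """Oracle-free efficiency metric: erase loops by keeping last occurrence."""
--     last_idx = {}
--     kept = []
--     for p in path:
--         if p in last_idx:
--             # remove everything after previous occurrence
--             idx = last_idx[p]
--             kept = kept[:idx+1]
--         else:
--             kept.append(p)
--         # update indices
--         for i, q in enumerate(kept):
--             last_idx[q] = i
--     return len(kept)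
-- ===== SOURCE B (Python) =====
-- def loop_erased_length(path: list[tuple[int,int]]) -> int:
--     """O(n): no kept list, no per-step index rebuild.  Keep only the current
--     kept length n and each point's index from when it was last appended
--     (A's rebuild never changes a stored index); a repeat truncates, which is
--     just n = min(n, idx + 1)."""
--     idx = {}
--     n = 0
--     for p in path:
--         j = idx.get(p)
--         if j is None:
--             idx[p] = n
--             n += 1
--         elif j + 1 < n:
--             n = j + 1
--     return n
-- ===== Notes on version B (the rewrite author's own statement) =====
-- stated objective: faster
-- what changed: B eliminates A's kept list and its full per-element index-rebuild loop: it keeps only the kept length and a dict of each point's index from when it was appended (which A's rebuild provably never changes), so a repeat becomes a single min and every element costs O(1).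
import Mathlib
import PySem

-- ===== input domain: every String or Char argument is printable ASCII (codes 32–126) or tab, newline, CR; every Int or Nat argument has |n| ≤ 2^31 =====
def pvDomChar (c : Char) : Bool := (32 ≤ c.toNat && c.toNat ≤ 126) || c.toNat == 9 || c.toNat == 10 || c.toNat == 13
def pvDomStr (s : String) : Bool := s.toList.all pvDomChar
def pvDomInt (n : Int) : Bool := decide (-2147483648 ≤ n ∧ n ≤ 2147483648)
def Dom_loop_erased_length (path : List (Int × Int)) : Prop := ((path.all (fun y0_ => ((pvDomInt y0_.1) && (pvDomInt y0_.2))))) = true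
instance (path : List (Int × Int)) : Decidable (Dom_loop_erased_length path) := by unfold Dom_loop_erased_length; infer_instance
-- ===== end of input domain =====

-- B replaces A's quadratic loop (list truncation + full index rebuild each step) by a
-- single O(n) pass keeping only the kept length and a last-appended-index dict.

-- ===== PORT A =====
def pvStepA (st : PySem.Dict (Int × Int) Int × List (Int × Int)) (p : Int × Int) :
    PySem.Dict (Int × Int) Int × List (Int × Int) :=
  -- if p in last_idx: kept = kept[:idx+1] else kept.append(p)
  let kept' :=
    match st.1.get? p with
    | some idx => PySem.List.slice st.2 none (some (idx + 1))
    | none => st.2 ++ [p]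
  -- for i, q in enumerate(kept): last_idx[q] = i
  ((PySem.List.enumerate kept' 0).foldl (fun d iq => d.insert iq.2 iq.1) st.1, kept')

def loop_erased_length (path : List (Int × Int)) : Int :=
  ((path.foldl pvStepA (PySem.Dict.empty, [])).2.length : Int)

-- ===== PORT B =====
-- Source B's for-loop, transliterated as tail recursion over the remaining path;
-- state is the dict `idx` and the running length `n`, in the loop's branch order.
def pvBGo : List (Int × Int) → PySem.Dict (Int × Int) Int → Int → Int
  | [], _, n => n
  | p :: rest, idx, n =>
    match idx.get? p with          -- j = idx.get(p)
    | none => pvBGo rest (idx.insert p n) (n + 1)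
    | some j => pvBGo rest idx (if j + 1 < n then j + 1 else n)

def loop_erased_length_alt (path : List (Int × Int)) : Int :=
  pvBGo path PySem.Dict.empty 0

-- ===== PRECONDITION & SPEC =====
def Spec_loop_erased_length (path : List (Int × Int)) (out : Int) : Prop := out = loop_erased_length_alt path
instance (path : List (Int × Int)) (out : Int) : Decidable (Spec_loop_erased_length path out) := by unfold Spec_loop_erased_length; infer_instance

-- ===== CLAIM (what is proved, stated in full; the proofs are below) =====
def Claim_equal_loop_erased_length : Prop := ∀ (path : List (Int × Int)), Dom_loop_erased_length path → Spec_loop_erased_length path (loop_erased_length path)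

-- ===== LEMMAS AND PROOFS =====

-- the coupling invariant between A's state (dict, kept) and B's running length
def pvInv (d : PySem.Dict (Int × Int) Int) (kept : List (Int × Int)) : Prop :=
  d.keys.Nodup ∧
  (∀ (i : Nat) (h : i < kept.length), d.get? kept[i] = some (i : Int)) ∧
  (∀ k v, d.get? k = some v → 0 ≤ v)

-- inserting a key with its current value is a no-op (keys unique)
theorem pv_insert_self {d : PySem.Dict (Int × Int) Int} {k : Int × Int} {v : Int}
    (hnd : d.keys.Nodup) (h : d.get? k = some v) : d.insert k v = d := by
  apply PySem.Dict.ext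
  have hc : d.contains k = true := by
    rw [PySem.Dict.contains_eq_isSome_get?, h]; rfl
  rw [PySem.Dict.items_insert, if_pos hc]
  conv_rhs => rw [← List.map_id d.items]
  apply List.map_congr_left
  intro p hp
  obtain ⟨p1, p2⟩ := p
  by_cases hk : p1 = k
  · subst hk
    have hpv : d.get? p1 = some p2 := PySem.Dict.get?_of_mem_items d hp hnd
    rw [h] at hpv
    have hv : p2 = v := (Option.some_inj.mp hpv).symm
    subst hv
    simp
  · simp [hk]

-- A's index-rebuild loop rewrites each kept entry with its current value: identity
theorem pv_foldl_enum_id (l : List (Int × Int)) (s : Nat) (d : PySem.Dict (Int × Int) Int)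
    (hnd : d.keys.Nodup)
    (h : ∀ (i : Nat) (hi : i < l.length), d.get? l[i] = some ((s + i : Nat) : Int)) :
    (PySem.List.enumerate l ((s : Nat) : Int)).foldl (fun d iq => d.insert iq.2 iq.1) d = d := by
  induction l generalizing s with
  | nil => simp [PySem.List.enumerate_nil]
  | cons x xs ih =>
    rw [PySem.List.enumerate_cons]
    simp only [List.foldl_cons]
    have h0 : d.get? x = some ((s : Nat) : Int) := by
      have := h 0 (by simp)
      simpa using this
    rw [pv_insert_self hnd h0]
    have : ((s : Nat) : Int) + 1 = (((s + 1 : Nat)) : Int) := by push_cast; ring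
    rw [this]
    apply ih (s + 1)
    intro i hi
    have := h (i + 1) (by simpa using Nat.succ_lt_succ hi)
    simpa [Nat.add_comm, Nat.add_left_comm, Nat.add_assoc] using this

-- B's recursion, started at A's current state, tracks A's fold
theorem pv_main (path : List (Int × Int)) (d : PySem.Dict (Int × Int) Int)
    (kept : List (Int × Int)) (hInv : pvInv d kept) :
    pvBGo path d ((kept.length : Nat) : Int)
      = (((path.foldl pvStepA (d, kept)).2.length : Nat) : Int) := by
  induction path generalizing d kept with
  | nil => simp [pvBGo]
  | cons p rest ih =>
    obtain ⟨hnd, hidx, hpos⟩ := hInv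
    simp only [List.foldl_cons]
    cases hg : d.get? p with
    | some idx =>
      have hidx0 : 0 ≤ idx := hpos p idx hg
      have hsl : PySem.List.slice kept none (some (idx + 1)) = kept.take (idx + 1).toNat :=
        PySem.List.slice_to kept (show (0:Int) ≤ idx + 1 by omega)
      have hlen : (kept.take (idx + 1).toNat).length = min ((idx + 1).toNat) kept.length :=
        List.length_take
      have htn : (((idx + 1).toNat : Nat) : Int) = idx + 1 := Int.toNat_of_nonneg (by omega)
      have hget : ∀ (i : Nat) (hi : i < (kept.take (idx + 1).toNat).length),
          d.get? (kept.take (idx + 1).toNat)[i] = some ((0 + i : Nat) : Int) := by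
        intro i hi
        have hi' : i < kept.length := lt_of_lt_of_le hi (by simp [hlen])
        have : (kept.take (idx + 1).toNat)[i] = kept[i] := List.getElem_take
        rw [this]
        simpa using hidx i hi'
      have hfold := pv_foldl_enum_id (kept.take (idx + 1).toNat) 0 d hnd hget
      simp only [Nat.cast_zero] at hfold
      have hstA : pvStepA (d, kept) p = (d, kept.take (idx + 1).toNat) := by
        simp only [pvStepA, hg, hsl, hfold]
      rw [hstA]
      have hval : (if idx + 1 < ((kept.length : Nat) : Int) then idx + 1
            else ((kept.length : Nat) : Int))
          = (((kept.take (idx + 1).toNat).length : Nat) : Int) := by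
        rw [hlen]
        have : ((min ((idx + 1).toNat) kept.length : Nat) : Int)
            = min (((idx + 1).toNat : Nat) : Int) ((kept.length : Nat) : Int) := by
          push_cast; rfl
        rw [this, htn]
        omega
      rw [pvBGo, hg]
      dsimp only
      rw [hval]
      apply ih
      refine ⟨hnd, ?_, hpos⟩
      intro i hi
      have hi' : i < kept.length := lt_of_lt_of_le hi (by simp [hlen])
      have : (kept.take (idx + 1).toNat)[i] = kept[i] := List.getElem_take
      rw [this]
      exact hidx i hi'
    | none =>
      have hfold : (PySem.List.enumerate (kept ++ [p]) 0).foldl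
          (fun d iq => d.insert iq.2 iq.1) d = d.insert p ((kept.length : Nat) : Int) := by
        rw [PySem.List.enumerate_append, List.foldl_append]
        have h1 : (PySem.List.enumerate kept 0).foldl (fun d iq => d.insert iq.2 iq.1) d = d := by
          have := pv_foldl_enum_id kept 0 d hnd (by intro i hi; simpa using hidx i hi)
          simpa using this
        rw [h1]
        rw [PySem.List.enumerate_cons, PySem.List.enumerate_nil]
        simp
      have hstA : pvStepA (d, kept) p
          = (d.insert p ((kept.length : Nat) : Int), kept ++ [p]) := by
        simp only [pvStepA, hg, hfold]
      rw [hstA]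
      rw [pvBGo, hg]
      dsimp only
      have hlen : ((kept.length : Nat) : Int) + 1 = (((kept ++ [p]).length : Nat) : Int) := by
        simp
      rw [hlen]
      apply ih
      refine ⟨PySem.Dict.nodup_keys_insert _ _ _ hnd, ?_, ?_⟩
      · intro i hi
        simp only [List.length_append, List.length_cons, List.length_nil] at hi
        by_cases hlt : i < kept.length
        · have he : (kept ++ [p])[i] = kept[i] := List.getElem_append_left hlt
          rw [he]
          have hne : kept[i] ≠ p := by
            intro hcon
            have := hidx i hlt
            rw [hcon, hg] at this
            simp at this
          rw [PySem.Dict.get?_insert_of_ne _ _ hne]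
          exact hidx i hlt
        · have hieq : i = kept.length := by omega
          subst hieq
          have he : (kept ++ [p])[kept.length] = p := by
            simp
          rw [he, PySem.Dict.get?_insert_self]
      · intro k v hk
        rw [PySem.Dict.get?_insert] at hk
        by_cases hkp : k = p
        · simp [hkp] at hk
          omega
        · simp [hkp] at hk
          exact hpos k v hk

-- ===== VERDICT (by name: the statement is the Claim_ definition above) =====
theorem loop_erased_length_spec : Claim_equal_loop_erased_length := by
  intro path _
  unfold Spec_loop_erased_length loop_erased_length loop_erased_length_alt
  have hInv : pvInv PySem.Dict.empty ([] : List (Int × Int)) := by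
    refine ⟨by simp [PySem.Dict.keys_empty], ?_, ?_⟩
    · intro i hi; simp at hi
    · intro k v hk
      rw [PySem.Dict.get?_empty] at hk
      simp at hk
  have := pv_main path PySem.Dict.empty [] hInv
  simp only [List.length_nil, Nat.cast_zero] at this
  rw [← this]
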